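-- pv_equiv track=rewrite | github.com/Gandres16/4240 | lecture7/ibm.py | max_teams
-- ===== SOURCE A (Python) =====
-- def max_teams(teamSizes, k):
--     teamSizes.sort()  # Sort the team sizes in non-decreasing order
--     maxTeams = 0  # Variable to store the maximum number of teams that can be formed
--
--     for i in range(1, teamSizes[-1] + 1):
--         reducedTeams = 0  # Number of teams that can be formed with team size i
--
--         for size in teamSizes:
--             if size > i:
--                 reducedTeams += min((size - i) // k, 1)  # Reduce team size of at most k teams
--
--         maxTeams = max(maxTeams, reducedTeams)
--
--     return maxTeams
--
--     def maxIndex(steps, badIndex):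
--         maxIndex = 0  # Variable to store the maximum index that can be reached
--         j = 1  # Starting value of j
--         for i in range(steps):
--             if maxIndex + j == badIndex:  # If the next index is the bad index, skip it
--                 j += 1
--             maxIndex += j  # Move to the next index
--             j += 1  # Increment j for the next step
--         return maxIndex
-- ===== SOURCE B (Python) =====
-- def max_teams(teamSizes, k):
--     # Closed form: the count of teams with size >= k+1 is the maximum over all
--     # target sizes i >= 1 of the number of teams reducible (by at most k) to i,
--     # attained at i = 1.  (Unlike A, this does not sort teamSizes in place.)
--     return sum(1 for s in teamSizes if s >= k + 1)
-- ===== Notes on version B (the rewrite author's own statement) =====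
-- stated objective: faster
-- what changed: Replaced A's sort plus scan over every candidate target size 1..max(teamSizes), each with an inner counting pass, by a single pass counting teams of size >= k+1 (the per-target count is antitone in the target size, so its maximum is attained at target 1).
-- outside the precondition, e.g. on max_teams([3], -1): A returns 0, B returns 1; on max_teams([1], 0): A returns 0, B returns 1
import Mathlib
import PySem

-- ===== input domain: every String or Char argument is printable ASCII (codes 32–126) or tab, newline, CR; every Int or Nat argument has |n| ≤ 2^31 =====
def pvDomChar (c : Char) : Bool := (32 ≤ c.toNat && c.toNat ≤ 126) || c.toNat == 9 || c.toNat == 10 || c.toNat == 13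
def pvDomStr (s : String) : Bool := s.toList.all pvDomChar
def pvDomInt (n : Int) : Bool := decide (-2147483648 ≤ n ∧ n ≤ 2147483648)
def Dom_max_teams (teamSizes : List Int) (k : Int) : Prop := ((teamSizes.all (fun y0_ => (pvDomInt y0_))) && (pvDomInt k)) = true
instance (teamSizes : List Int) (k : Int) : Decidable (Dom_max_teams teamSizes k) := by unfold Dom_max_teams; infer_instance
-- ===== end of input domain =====

-- B replaces A's scan over all target sizes 1..max with a single count of sizes >= k+1
-- (the per-target count is antitone, so its maximum is at target 1): asymptotically faster.
-- A sorts teamSizes in place; B does not mutate it — the equivalence proved is about the return value.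


-- ===== PORT A =====
-- inner 'for size in teamSizes' loop of A
def aInner (ts : List Int) (k i : Int) : Int :=
  ts.foldl (fun reducedTeams size =>
    if size > i then reducedTeams + min (PySem.Int.floordiv (size - i) k) 1 else reducedTeams) 0

-- body of A after the in-place sort (ts = the sorted list)
def aBody (ts : List Int) (k : Int) : Int :=
  match PySem.List.pyGet? ts (-1) with
  | none => 0  -- teamSizes[-1] is an IndexError on []; excluded by Pre_
  | some last =>
    (PySem.List.pyRange 1 (last + 1) 1).foldl (fun maxTeams i => max maxTeams (aInner ts k i)) 0

def max_teams (teamSizes : List Int) (k : Int) : Int :=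
  aBody (PySem.List.sorted teamSizes (fun x => x) false) k

-- ===== PORT B =====
def max_teams_alt (teamSizes : List Int) (k : Int) : Int :=
  (teamSizes.countP (fun s => decide (k + 1 ≤ s)) : Int)

-- ===== PRECONDITION & SPEC =====
-- Pre_ restricts to the natural domain: a nonempty list (A raises IndexError on []) and a
-- positive reduction amount k (k = 0 makes A divide by zero whenever max(teamSizes) ≥ 2, and for
-- k < 0 A's returned 0 comes from negative floor-division terms, outside the task's meaning).
def Pre_max_teams (teamSizes : List Int) (k : Int) : Prop := teamSizes ≠ [] ∧ 1 ≤ k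
instance (teamSizes : List Int) (k : Int) : Decidable (Pre_max_teams teamSizes k) := by unfold Pre_max_teams; infer_instance
def pvWitness_max_teams : List Int × Int := ([2, 3], 1)

def Spec_max_teams (teamSizes : List Int) (k : Int) (out : Int) : Prop := out = max_teams_alt teamSizes k
instance (teamSizes : List Int) (k : Int) (out : Int) : Decidable (Spec_max_teams teamSizes k out) := by unfold Spec_max_teams; infer_instance

-- ===== CLAIM (what is proved, stated in full; the proofs are below) =====
def Claim_equal_max_teams : Prop := ∀ (teamSizes : List Int) (k : Int), Dom_max_teams teamSizes k → Pre_max_teams teamSizes k → Spec_max_teams teamSizes k (max_teams teamSizes k)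

-- ===== LEMMAS AND PROOFS =====

-- One inner-loop term: for k ≥ 1 and size > i, min((size-i)//k, 1) is the 0/1 indicator of size ≥ i+k.
theorem aTerm_eq (k i size : Int) (hk : 1 ≤ k) (hs : i < size) :
    min (PySem.Int.floordiv (size - i) k) 1 = if i + k ≤ size then 1 else 0 := by
  by_cases h : i + k ≤ size
  · have h1 : (1 : Int) ≤ PySem.Int.floordiv (size - i) k :=
      (PySem.Int.le_floordiv_iff_mul_le (by omega)).2 (by omega)
    simp [h, min_eq_right h1]
  · have h0 : PySem.Int.floordiv (size - i) k < 1 :=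
      (PySem.Int.floordiv_lt_iff_lt_mul (by omega)).2 (by omega)
    have h0' : (0 : Int) ≤ PySem.Int.floordiv (size - i) k :=
      (PySem.Int.le_floordiv_iff_mul_le (by omega)).2 (by omega)
    have : PySem.Int.floordiv (size - i) k = 0 := by omega
    simp [h, this]

-- The whole inner loop counts the sizes ≥ i+k.
theorem aInner_eq_countP (ts : List Int) (k i : Int) (hk : 1 ≤ k) :
    aInner ts k i = (ts.countP (fun s => decide (i + k ≤ s)) : Int) := by
  unfold aInner
  suffices h : ∀ (l : List Int) (acc : Int),
      l.foldl (fun reducedTeams size =>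
        if size > i then reducedTeams + min (PySem.Int.floordiv (size - i) k) 1 else reducedTeams) acc
        = acc + (l.countP (fun s => decide (i + k ≤ s)) : Int) by
    simpa using h ts 0
  intro l
  induction l with
  | nil => simp
  | cons a t ih =>
    intro acc
    by_cases hai : i < a
    · simp only [List.foldl_cons, List.countP_cons, hai, aTerm_eq k i a hk hai, ih]
      by_cases h : i + k ≤ a
      · simp [h]; ring
      · simp [h]
    · have : ¬ (i + k ≤ a) := by omega
      simp only [List.foldl_cons, List.countP_cons, if_neg hai, ih, this]
      simp

-- The count is antitone in the target size i.
theorem countP_antitone (ts : List Int) (k i : Int) (hi : 1 ≤ i) :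
    (ts.countP (fun s => decide (i + k ≤ s)) : Int) ≤ (ts.countP (fun s => decide (1 + k ≤ s)) : Int) := by
  exact_mod_cast List.countP_mono_left (fun x _ hx => by simp at hx ⊢; omega)

-- Folding max over values all ≤ acc leaves acc.
theorem foldl_max_le (f : Int → Int) :
    ∀ (l : List Int) (acc : Int), (∀ i ∈ l, f i ≤ acc) →
      l.foldl (fun a i => max a (f i)) acc = acc := by
  intro l
  induction l with
  | nil => intro acc _; rfl
  | cons a t ih =>
    intro acc h
    have ha : f a ≤ acc := h a (by simp)
    simp only [List.foldl_cons, max_eq_left ha]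
    exact ih acc (fun i hi => h i (by simp [hi]))

-- In a ≤-sorted list the last element bounds every element.
theorem last_is_max : ∀ (l : List Int) (m : Int), l.Pairwise (· ≤ ·) → l.getLast? = some m →
    ∀ x ∈ l, x ≤ m := by
  intro l
  induction l with
  | nil => intro m _ h; simp at h
  | cons a t ih =>
    intro m hp hl x hx
    rcases List.pairwise_cons.1 hp with ⟨ha, hpt⟩
    cases t with
    | nil =>
      simp at hl hx; omega
    | cons b u =>
      have hl' : (b :: u).getLast? = some m := by
        simpa [List.getLast?_cons_cons] using hl
      rcases List.mem_cons.1 hx with rfl | hx'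
      · have hb : x ≤ b := ha b (by simp)
        have := ih m hpt hl' b (by simp)
        omega
      · exact ih m hpt hl' x hx'

theorem max_teams_eq (teamSizes : List Int) (k : Int)
    (hne : teamSizes ≠ []) (hk : 1 ≤ k) :
    max_teams teamSizes k = max_teams_alt teamSizes k := by
  unfold max_teams aBody
  set ts := PySem.List.sorted teamSizes (fun x => x) false with hts
  have htsne : ts ≠ [] := by
    intro h; exact hne ((PySem.List.sorted_eq_nil_iff _ _ _).1 h)
  have hperm : ts.Perm teamSizes := PySem.List.sorted_perm teamSizes (fun x => x) false
  have hcount : ∀ p : Int → Bool, ts.countP p = teamSizes.countP p :=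
    fun p => hperm.countP_eq p
  have haltc : max_teams_alt teamSizes k = (ts.countP (fun s => decide (1 + k ≤ s)) : Int) := by
    unfold max_teams_alt
    rw [hcount]
    congr 1
    apply List.countP_congr
    intro x _
    simp [Int.add_comm]
  rw [PySem.List.pyGet?_neg_one]
  rcases hlast : ts.getLast? with _ | m
  · exact absurd (List.getLast?_eq_none_iff.1 hlast) htsne
  · simp only
    have hmax : ∀ x ∈ ts, x ≤ m :=
      last_is_max ts m (by simpa using PySem.List.sorted_pairwise teamSizes (fun x => x)) hlast
    by_cases hm : 1 ≤ m
    · -- loop runs; first iteration i = 1 attains the maximum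
      rw [PySem.List.pyRange_one_cons (by omega)]
      simp only [List.foldl_cons]
      have h1 : aInner ts k 1 = (ts.countP (fun s => decide (1 + k ≤ s)) : Int) :=
        aInner_eq_countP ts k 1 hk
      have h1n : (0 : Int) ≤ aInner ts k 1 := by rw [h1]; positivity
      rw [max_eq_right h1n]
      rw [foldl_max_le _ _ _ ?_, h1, haltc]
      intro i hi
      have hi2 : 1 + 1 ≤ i ∧ i < m + 1 := by
        have := (PySem.List.mem_pyRange_one).1 hi; omega
      rw [h1, aInner_eq_countP ts k i hk]
      exact countP_antitone ts k i (by omega)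
    · -- max(teamSizes) ≤ 0: empty range, and no size reaches k+1 ≥ 2
      have hrange : PySem.List.pyRange 1 (m + 1) 1 = [] := by
        rw [PySem.List.pyRange_one]
        have h0 : (m + 1 - 1).toNat = 0 := by omega
        rw [h0]
        rfl
      rw [hrange]
      simp only [List.foldl_nil]
      rw [haltc]
      have : ts.countP (fun s => decide (1 + k ≤ s)) = 0 := by
        rw [List.countP_eq_zero]
        intro x hx
        have := hmax x hx
        simp; omega
      simp [this]

-- ===== VERDICT (by name: the statement is the Claim_ definition above) =====
theorem max_teams_spec : Claim_equal_max_teams := by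
  intro teamSizes k _ hpre
  exact max_teams_eq teamSizes k hpre.1 hpre.2
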